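-- pv_equiv track=rewrite | github.com/KevinHeist/FantasyRanker | projFunctions.py | CombineFunction
-- ===== SOURCE A (Python) =====
-- def CombineFunction(dict1, dict2, newDict):
--     # Goes through each element of the dict
--     for (key1, val1), (key2, val2) in zip(dict1.items(), dict2.items()):
--         # std placeholder value, allows for you to append each of the new rankings easier
--         std = [[], []]
--         # val will be in the form (ovrRank, posRank)
--
--         # create new dict if the player is not in dict1
--         if key1 not in newDict:
--             newDict[key1] = std
--             newDict[key1] = std[0].append(val1[0])
--             newDict[key1] = std[1].append(val1[1])
--             newDict[key1] = std
--             std = [[], []]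
--         else:
--             # appends if player is already in from dict2
--             std = newDict[key1]
--             newDict[key1] = std[0].append(val1[0])
--             newDict[key1] = std[1].append(val1[1])
--             newDict[key1] = std
--             std = [[], []]
--
--         # create new dict if the player is not in dict2
--         if key2 not in newDict:
--             newDict[key2] = std
--             newDict[key2] = std[0].append(val2[0])
--             newDict[key2] = std[1].append(val2[1])
--             newDict[key2] = std
--             std = [[], []]
--         else:
--             # appends if player is already in from dict1
--             std = newDict[key2]
--             newDict[key2] = std[0].append(val2[0])
--             newDict[key2] = std[1].append(val2[1])
--             newDict[key2] = std
--             std = [[], []]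
--     return newDict
-- ===== SOURCE B (Python) =====
-- def CombineFunction(dict1, dict2, newDict):
--     # Group-by construction: flatten the zipped items into one stream, group the
--     # contributions per key, compute the final key order, then build each output
--     # entry in ONE shot from all of that key's contributions (instead of A's
--     # per-item mutation of newDict with two duplicated if/else blocks).
--     # Note: A mutates newDict in place and returns it; B builds a fresh dict with
--     # an equal value (the equivalence claimed is about the return value).
--     stream = []
--     for (k1, v1), (k2, v2) in zip(dict1.items(), dict2.items()):
--         stream.append((k1, v1))
--         stream.append((k2, v2))
--     groups = {}
--     for k, v in stream:
--         groups.setdefault(k, []).append(v)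
--     keys = list(newDict)
--     seen = set(keys)
--     for k, _ in stream:
--         if k not in seen:
--             keys.append(k)
--             seen.add(k)
--     result = {}
--     for k in keys:
--         vals = groups.get(k, [])
--         if not vals:
--             result[k] = newDict[k]
--         else:
--             entry = list(newDict.get(k, [[], []]))
--             entry[0] = entry[0] + [v[0] for v in vals]
--             entry[1] = entry[1] + [v[1] for v in vals]
--             result[k] = entry
--     return result
-- ===== Notes on version B (the rewrite author's own statement) =====
-- stated objective: alternative
-- what changed: A incrementally mutates newDict per zipped item with two duplicated if/else append blocks; B instead does a staged group-by: it flattens the pairs into one stream, groups the contributions per key, computes the final key order once, and then constructs each output entry in a single shot from all of that key's contributions.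
import Mathlib
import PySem

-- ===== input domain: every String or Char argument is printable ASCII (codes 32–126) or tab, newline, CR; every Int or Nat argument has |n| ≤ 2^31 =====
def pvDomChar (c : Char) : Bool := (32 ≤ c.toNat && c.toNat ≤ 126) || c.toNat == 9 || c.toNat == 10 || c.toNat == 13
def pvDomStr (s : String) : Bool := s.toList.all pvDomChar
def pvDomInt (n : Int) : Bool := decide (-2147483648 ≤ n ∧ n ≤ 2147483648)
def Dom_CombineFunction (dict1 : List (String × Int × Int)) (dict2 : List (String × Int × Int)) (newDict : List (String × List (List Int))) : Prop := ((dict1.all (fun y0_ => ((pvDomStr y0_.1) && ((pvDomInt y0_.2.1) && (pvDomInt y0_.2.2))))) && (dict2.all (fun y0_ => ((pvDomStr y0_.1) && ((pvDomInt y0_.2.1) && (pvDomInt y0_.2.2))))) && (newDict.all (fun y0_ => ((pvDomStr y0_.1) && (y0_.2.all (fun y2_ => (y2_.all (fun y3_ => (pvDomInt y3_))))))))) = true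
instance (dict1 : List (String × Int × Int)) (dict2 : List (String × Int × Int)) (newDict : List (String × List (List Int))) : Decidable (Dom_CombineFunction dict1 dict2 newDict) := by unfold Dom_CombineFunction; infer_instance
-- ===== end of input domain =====

-- B replaces A's per-item mutation of newDict (two duplicated if/else append blocks) by a
-- group-by construction: one flattened stream, the final key order computed once, and each
-- output entry built in a single shot from all of that key's contributions. Same result,
-- different algorithm; in Python A mutates newDict in place and returns it while B builds
-- a fresh dict — the equivalence proved here is about the RETURN value.

-- ===== PORT A =====
-- A's body assigns `newDict[key] = std[0].append(...)` (i.e. None) and immediately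
-- overwrites it with `newDict[key] = std`; the transient None cannot be typed, so each
-- block is ported as its net effect on the dict, keeping A's branch structure and the
-- duplicated key1/key2 blocks.  `std[i].append(x)` (in-place) becomes `std.set i (std[i] ++ [x])`.
def CombineFunction (dict1 : List (String × Int × Int)) (dict2 : List (String × Int × Int)) (newDict : List (String × List (List Int))) : List (String × List (List Int)) :=
  ((List.zip (PySem.Dict.ofList dict1).items (PySem.Dict.ofList dict2).items).foldl
    (fun nd pr =>
      let key1 := pr.1.1; let val1 := pr.1.2
      let key2 := pr.2.1; let val2 := pr.2.2
      -- first block: key1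
      let nd :=
        if nd.contains key1 = false then
          let std : List (List Int) := [[], []]
          let std := std.set 0 (((PySem.List.pyGet? std 0).getD []) ++ [val1.1])
          let std := std.set 1 (((PySem.List.pyGet? std 1).getD []) ++ [val1.2])
          nd.insert key1 std
        else
          let std := (nd.get? key1).getD []
          let std := std.set 0 (((PySem.List.pyGet? std 0).getD []) ++ [val1.1])
          let std := std.set 1 (((PySem.List.pyGet? std 1).getD []) ++ [val1.2])
          nd.insert key1 std
      -- second block: key2 (duplicated in A)
      if nd.contains key2 = false then
        let std : List (List Int) := [[], []]
        let std := std.set 0 (((PySem.List.pyGet? std 0).getD []) ++ [val2.1])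
        let std := std.set 1 (((PySem.List.pyGet? std 1).getD []) ++ [val2.2])
        nd.insert key2 std
      else
        let std := (nd.get? key2).getD []
        let std := std.set 0 (((PySem.List.pyGet? std 0).getD []) ++ [val2.1])
        let std := std.set 1 (((PySem.List.pyGet? std 1).getD []) ++ [val2.2])
        nd.insert key2 std)
    (PySem.Dict.ofList newDict)).items

-- ===== PORT B =====
-- transliteration of Source B: stream building loop, grouping loop, key-order loop with the
-- `seen` set, then the group-by loop building `result`.
-- `groups.setdefault(k, []).append(v)` (net effect: groups[k] = groups.get(k, []) + [v])
-- is PySem.Dict.modify; `entry[i] = entry[i] + …` becomes `.set i`.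
def CombineFunction_alt (dict1 : List (String × Int × Int)) (dict2 : List (String × Int × Int)) (newDict : List (String × List (List Int))) : List (String × List (List Int)) :=
  let stream := (List.zip (PySem.Dict.ofList dict1).items (PySem.Dict.ofList dict2).items).foldl
      (fun s pr => s ++ [pr.1, pr.2]) []
  let groups := stream.foldl (fun g kv => g.modify kv.1 [] (· ++ [kv.2])) PySem.Dict.empty
  let nd := PySem.Dict.ofList newDict
  let ks := stream.foldl
      (fun (acc : List String × PySem.Set String) kv =>
        if PySem.Set.contains acc.2 kv.1 then acc
        else (acc.1 ++ [kv.1], PySem.Set.add acc.2 kv.1))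
      (nd.keys, PySem.Set.ofList nd.keys)
  (ks.1.foldl
    (fun res k =>
      let vals := groups.getD k []
      if vals.isEmpty then res.insert k ((nd.get? k).getD [])
      else
        let entry := nd.getD k [[], []]
        let entry := entry.set 0 (((PySem.List.pyGet? entry 0).getD []) ++ vals.map (·.1))
        let entry := entry.set 1 (((PySem.List.pyGet? entry 1).getD []) ++ vals.map (·.2))
        res.insert k entry)
    PySem.Dict.empty).items

-- ===== PRECONDITION & SPEC =====
-- Pre_ excludes exactly the inputs on which Python A raises IndexError: a key occurring in
-- the zipped stream whose pre-existing value in newDict has fewer than 2 sublists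
-- (then `std[0]` or `std[1]` raises; B raises there too).
def Pre_CombineFunction (dict1 : List (String × Int × Int)) (dict2 : List (String × Int × Int)) (newDict : List (String × List (List Int))) : Prop :=
  ∀ pr ∈ List.zip (PySem.Dict.ofList dict1).items (PySem.Dict.ofList dict2).items,
    2 ≤ (((PySem.Dict.ofList newDict).get? pr.1.1).getD [[], []]).length ∧
    2 ≤ (((PySem.Dict.ofList newDict).get? pr.2.1).getD [[], []]).length
instance (dict1 : List (String × Int × Int)) (dict2 : List (String × Int × Int)) (newDict : List (String × List (List Int))) : Decidable (Pre_CombineFunction dict1 dict2 newDict) := by unfold Pre_CombineFunction; infer_instance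

def pvWitness_CombineFunction : (List (String × Int × Int)) × (List (String × Int × Int)) × (List (String × List (List Int))) :=
  ([("a", 1, 2), ("b", 3, 4)], [("b", 5, 6), ("c", 7, 8)], [("a", [[9], [10]])])

def Spec_CombineFunction (dict1 : List (String × Int × Int)) (dict2 : List (String × Int × Int)) (newDict : List (String × List (List Int))) (out : List (String × List (List Int))) : Prop := out = CombineFunction_alt dict1 dict2 newDict
instance (dict1 : List (String × Int × Int)) (dict2 : List (String × Int × Int)) (newDict : List (String × List (List Int))) (out : List (String × List (List Int))) : Decidable (Spec_CombineFunction dict1 dict2 newDict out) := by unfold Spec_CombineFunction; infer_instance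

-- ===== CLAIM (what is proved, stated in full; the proofs are below) =====
def Claim_equal_CombineFunction : Prop := ∀ (dict1 : List (String × Int × Int)) (dict2 : List (String × Int × Int)) (newDict : List (String × List (List Int))), Dom_CombineFunction dict1 dict2 newDict → Pre_CombineFunction dict1 dict2 newDict → Spec_CombineFunction dict1 dict2 newDict (CombineFunction dict1 dict2 newDict)

-- ===== LEMMAS AND PROOFS =====

-- one key/val block of A (both branches), as it appears inside A's fold body
def pvStepA (nd : PySem.Dict String (List (List Int))) (key : String) (val : Int × Int) : PySem.Dict String (List (List Int)) :=
  if nd.contains key = false then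
    let std : List (List Int) := [[], []]
    let std := std.set 0 (((PySem.List.pyGet? std 0).getD []) ++ [val.1])
    let std := std.set 1 (((PySem.List.pyGet? std 1).getD []) ++ [val.2])
    nd.insert key std
  else
    let std := (nd.get? key).getD []
    let std := std.set 0 (((PySem.List.pyGet? std 0).getD []) ++ [val.1])
    let std := std.set 1 (((PySem.List.pyGet? std 1).getD []) ++ [val.2])
    nd.insert key std

-- appending one value pair into slots 0 and 1 of an entry
def pvApp2 (e : List (List Int)) (v : Int × Int) : List (List Int) :=
  let e1 := e.set 0 (((PySem.List.pyGet? e 0).getD []) ++ [v.1])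
  e1.set 1 (((PySem.List.pyGet? e1 1).getD []) ++ [v.2])

-- appending a whole list of value pairs at once (B's one-shot entry construction)
def pvAppAll (e : List (List Int)) (vs : List (Int × Int)) : List (List Int) :=
  let e1 := e.set 0 (((PySem.List.pyGet? e 0).getD []) ++ vs.map (·.1))
  e1.set 1 (((PySem.List.pyGet? e1 1).getD []) ++ vs.map (·.2))

-- A's step in insert form
def pvStepIns (nd : PySem.Dict String (List (List Int))) (kv : String × Int × Int) : PySem.Dict String (List (List Int)) :=
  nd.insert kv.1 (pvApp2 (nd.getD kv.1 [[], []]) kv.2)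

-- all stream contributions for key k, in order
def pvVals (stream : List (String × Int × Int)) (k : String) : List (Int × Int) :=
  (stream.filter (fun kv => kv.1 == k)).map (·.2)

theorem pvAppAll_nil (e : List (List Int)) : pvAppAll e [] = e := by
  rcases e with _ | ⟨a, _ | ⟨b, t⟩⟩
  · simp [pvAppAll, PySem.List.pyGet?, PySem.List.pyIdx?]
  · simp [pvAppAll, PySem.List.pyGet?, PySem.List.pyIdx?]
  · simp [pvAppAll, PySem.List.pyGet?, PySem.List.pyIdx?,
      show (0:Int) ≤ (t.length:Int) + 1 from by positivity]

theorem pvAppAll_cons (e : List (List Int)) (v : Int × Int) (vs : List (Int × Int)) :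
    pvAppAll e (v :: vs) = pvAppAll (pvApp2 e v) vs := by
  rcases e with _ | ⟨a, _ | ⟨b, t⟩⟩
  · simp [pvAppAll, pvApp2, PySem.List.pyGet?, PySem.List.pyIdx?]
  · simp [pvAppAll, pvApp2, PySem.List.pyGet?, PySem.List.pyIdx?]
  · simp [pvAppAll, pvApp2, PySem.List.pyGet?, PySem.List.pyIdx?,
      show (0:Int) ≤ (t.length:Int) + 1 from by positivity]

theorem pvStep_eq (nd : PySem.Dict String (List (List Int))) (kv : String × Int × Int) :
    pvStepA nd kv.1 kv.2 = pvStepIns nd kv := by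
  unfold pvStepA pvStepIns pvApp2
  by_cases h : nd.contains kv.1 = false
  · rw [if_pos h, PySem.Dict.getD_of_not_contains nd _ h]
  · have hc : nd.contains kv.1 = true := by revert h; cases nd.contains kv.1 <;> simp
    have hs : ∃ w, nd.get? kv.1 = some w := by
      have h2 := PySem.Dict.contains_eq_isSome_get? nd kv.1
      rw [hc] at h2
      cases hg : nd.get? kv.1 with
      | none => rw [hg] at h2; simp at h2
      | some w => exact ⟨w, rfl⟩
    obtain ⟨w, hw⟩ := hs
    rw [if_neg (by simp [hc]), PySem.Dict.getD_eq_get?_getD, hw]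
    rfl

-- A's paired fold over the zip is the stream fold of its per-key step
theorem pv_A_fold (L : List ((String × Int × Int) × (String × Int × Int)))
    (nd : PySem.Dict String (List (List Int))) :
    L.foldl (fun nd pr => pvStepA (pvStepA nd pr.1.1 pr.1.2) pr.2.1 pr.2.2) nd =
      (L.flatMap (fun pr => [pr.1, pr.2])).foldl pvStepIns nd := by
  rw [PySem.List.foldl_congr_mem L (fun nd pr => pvStepA (pvStepA nd pr.1.1 pr.1.2) pr.2.1 pr.2.2)
    (fun nd pr => pvStepIns (pvStepIns nd pr.1) pr.2) nd
    (fun acc pr _ => by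
      show pvStepA (pvStepA acc pr.1.1 pr.1.2) pr.2.1 pr.2.2 = pvStepIns (pvStepIns acc pr.1) pr.2
      rw [pvStep_eq acc pr.1, pvStep_eq (pvStepIns acc pr.1) pr.2])]
  induction L generalizing nd with
  | nil => rfl
  | cons hd tl ih =>
      simp only [List.foldl_cons, List.flatMap_cons, List.foldl_append, List.foldl_cons,
        List.foldl_nil, ih]

theorem pvVals_cons (p : String × Int × Int) (t : List (String × Int × Int)) (c : String) :
    pvVals (p :: t) c = if p.1 = c then p.2 :: pvVals t c else pvVals t c := by
  by_cases h : p.1 = c <;> simp [pvVals, h]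

-- the value of key c after A's fold: all of c's contributions appended in one shot
theorem pv_get?_foldl (l : List (String × Int × Int)) (nd : PySem.Dict String (List (List Int))) (c : String) :
    (l.foldl pvStepIns nd).get? c =
      if pvVals l c = [] then nd.get? c
      else some (pvAppAll ((nd.get? c).getD [[], []]) (pvVals l c)) := by
  induction l generalizing nd with
  | nil => simp [pvVals]
  | cons p t ih =>
      rw [List.foldl_cons, ih, pvVals_cons]
      by_cases h : p.1 = c
      · have hg : (pvStepIns nd p).get? c = some (pvApp2 (nd.getD p.1 [[], []]) p.2) := by
          rw [show pvStepIns nd p = nd.insert p.1 (pvApp2 (nd.getD p.1 [[], []]) p.2) from rfl,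
            PySem.Dict.get?_insert, if_pos h.symm]
        rw [if_pos h, if_neg (List.cons_ne_nil p.2 (pvVals t c)), pvAppAll_cons]
        by_cases ht : pvVals t c = []
        · rw [if_pos ht, hg, ht, pvAppAll_nil, PySem.Dict.getD_eq_get?_getD, h]
        · rw [if_neg ht, hg]
          simp [PySem.Dict.getD_eq_get?_getD, h]
      · have hg : (pvStepIns nd p).get? c = nd.get? c := by
          rw [show pvStepIns nd p = nd.insert p.1 (pvApp2 (nd.getD p.1 [[], []]) p.2) from rfl,
            PySem.Dict.get?_insert, if_neg (fun hh => h hh.symm)]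
        rw [if_neg h, hg]

-- B's key-order fold carries (keys, seen) with keys = seen; it computes Set.update
theorem pv_keys_fold (l : List (String × Int × Int)) (s : List String) :
    l.foldl
      (fun (acc : List String × PySem.Set String) kv =>
        if PySem.Set.contains acc.2 kv.1 then acc
        else (acc.1 ++ [kv.1], PySem.Set.add acc.2 kv.1))
      (s, s) =
    (PySem.Set.update s (l.map (·.1)), PySem.Set.update s (l.map (·.1))) := by
  induction l generalizing s with
  | nil => rfl
  | cons p t ih =>
      rw [List.foldl_cons]
      have hstep :
          (if ((s, s) : List String × PySem.Set String).2.contains p.1 = true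
            then ((s, s) : List String × PySem.Set String)
            else ((s, s).1 ++ [p.1], ((s, s) : List String × PySem.Set String).2.add p.1))
          = (PySem.Set.add s p.1, PySem.Set.add s p.1) := by
        show (if PySem.Set.contains s p.1 = true then ((s, s) : List String × PySem.Set String)
              else (s ++ [p.1], PySem.Set.add s p.1)) = _
        by_cases hc : PySem.Set.contains s p.1 = true
        · rw [if_pos hc, show PySem.Set.add s p.1 = s from by
            simp [PySem.Set.add, PySem.Set.contains] at hc ⊢; simp [hc]]
        · rw [if_neg hc, show PySem.Set.add s p.1 = s ++ [p.1] from by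
            simp [PySem.Set.add, PySem.Set.contains] at hc ⊢; simp [hc]]
      rw [hstep, ih]
      simp [PySem.Set.update]

-- rebuilding a nodup-keys dict from its keys and lookups gives back its items
theorem pv_rebuild (F : PySem.Dict String (List (List Int))) (h : F.keys.Nodup) :
    (F.keys.foldl (fun res k => res.insert k ((F.get? k).getD [])) PySem.Dict.empty).items = F.items := by
  rw [show (fun (res : PySem.Dict String (List (List Int))) k => res.insert k ((F.get? k).getD []))
      = (fun (d : PySem.Dict String (List (List Int))) a =>
          d.insert (id a) ((fun k => (F.get? k).getD []) a)) from rfl]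
  rw [PySem.Dict.items_foldl_insert_fresh F.keys id (fun k => (F.get? k).getD []) PySem.Dict.empty
      (fun a _ => PySem.Dict.contains_empty a) (by simpa using h)]
  have hemp : (PySem.Dict.empty : PySem.Dict String (List (List Int))).items = [] := rfl
  rw [hemp, List.nil_append]
  have hkeys : F.keys = F.items.map Prod.fst := rfl
  rw [hkeys, List.map_map]
  conv_rhs => rw [← List.map_id F.items]
  refine List.map_congr_left (fun p hp => ?_)
  have hg : F.get? p.1 = some p.2 := PySem.Dict.get?_of_mem_items F hp h
  simp [hg]

-- B's whole body, for an arbitrary stream and start dict, equals A's stream fold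
theorem pv_B_eq (stream : List (String × Int × Int)) (nd : PySem.Dict String (List (List Int)))
    (h : nd.keys.Nodup) :
    ((stream.foldl
        (fun (acc : List String × PySem.Set String) kv =>
          if PySem.Set.contains acc.2 kv.1 then acc
          else (acc.1 ++ [kv.1], PySem.Set.add acc.2 kv.1))
        (nd.keys, PySem.Set.ofList nd.keys)).1.foldl
      (fun res k =>
        let vals := (stream.foldl (fun g kv => g.modify kv.1 [] (· ++ [kv.2])) PySem.Dict.empty).getD k []
        if vals.isEmpty then res.insert k ((nd.get? k).getD [])
        else
          let entry := nd.getD k [[], []]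
          let entry := entry.set 0 (((PySem.List.pyGet? entry 0).getD []) ++ vals.map (·.1))
          let entry := entry.set 1 (((PySem.List.pyGet? entry 1).getD []) ++ vals.map (·.2))
          res.insert k entry)
      PySem.Dict.empty).items
    = (stream.foldl pvStepIns nd).items := by
  rw [PySem.Set.ofList_eq_self_of_nodup _ h, pv_keys_fold]
  rw [show ((PySem.Set.update nd.keys (stream.map (·.1)), PySem.Set.update nd.keys (stream.map (·.1)))
      : List String × PySem.Set String).1 = PySem.Set.update nd.keys (stream.map (·.1)) from rfl]
  have hsw : stream.foldl pvStepIns nd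
      = stream.foldl (fun d x => d.insert x.1 (pvApp2 (d.getD x.1 [[], []]) x.2)) nd :=
    PySem.List.foldl_congr_mem _ _ _ _ (fun acc x _ => rfl)
  have hK : (stream.foldl pvStepIns nd).keys = PySem.Set.update nd.keys (stream.map (·.1)) := by
    rw [hsw]
    exact PySem.Dict.keys_foldl_insert_key stream (fun kv => kv.1)
      (fun d x => pvApp2 (d.getD x.1 [[], []]) x.2) nd
  have hNodup : (stream.foldl pvStepIns nd).keys.Nodup := by
    rw [hsw]
    exact PySem.Dict.nodup_keys_foldl_insert_key stream (fun kv => kv.1)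
      (fun d x => pvApp2 (d.getD x.1 [[], []]) x.2) nd h
  have hvals : ∀ k : String,
      (stream.foldl (fun g kv => g.modify kv.1 [] (· ++ [kv.2]))
        (PySem.Dict.empty : PySem.Dict String (List (Int × Int)))).getD k []
      = pvVals stream k := by
    intro k
    rw [PySem.Dict.getD_foldl_modify_append]
    simp [pvVals, PySem.Dict.getD_empty]
  have hbody : ∀ (res : PySem.Dict String (List (List Int))) (k : String),
      (fun res k =>
        let vals := (stream.foldl (fun g kv => g.modify kv.1 [] (· ++ [kv.2])) PySem.Dict.empty).getD k []
        if vals.isEmpty then res.insert k ((nd.get? k).getD [])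
        else
          let entry := nd.getD k [[], []]
          let entry := entry.set 0 (((PySem.List.pyGet? entry 0).getD []) ++ vals.map (·.1))
          let entry := entry.set 1 (((PySem.List.pyGet? entry 1).getD []) ++ vals.map (·.2))
          res.insert k entry) res k
      = res.insert k (((stream.foldl pvStepIns nd).get? k).getD []) := by
    intro res k
    simp only [hvals]
    show (if (pvVals stream k).isEmpty then res.insert k ((nd.get? k).getD [])
        else res.insert k (pvAppAll (nd.getD k [[], []]) (pvVals stream k)))
      = res.insert k (((stream.foldl pvStepIns nd).get? k).getD [])
    rw [pv_get?_foldl]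
    by_cases hv : pvVals stream k = []
    · rw [if_pos (by simp [hv]), if_pos hv]
    · rw [if_neg (by simp [hv]), if_neg hv]
      simp [PySem.Dict.getD_eq_get?_getD]
  rw [← hK]
  have hcong := PySem.List.foldl_congr_mem ((stream.foldl pvStepIns nd).keys) _ _
    PySem.Dict.empty (fun res k _ => hbody res k)
  rw [hcong]
  exact pv_rebuild _ hNodup

-- ===== VERDICT (by name: the statement is the Claim_ definition above) =====
theorem CombineFunction_spec : Claim_equal_CombineFunction := by
  intro dict1 dict2 newDict _ _
  show CombineFunction dict1 dict2 newDict = CombineFunction_alt dict1 dict2 newDict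
  have hA : CombineFunction dict1 dict2 newDict
      = (((List.zip (PySem.Dict.ofList dict1).items (PySem.Dict.ofList dict2).items).flatMap
          (fun pr => [pr.1, pr.2])).foldl pvStepIns (PySem.Dict.ofList newDict)).items := by
    unfold CombineFunction
    congr 1
    exact pv_A_fold _ _
  have hB : CombineFunction_alt dict1 dict2 newDict
      = (((List.zip (PySem.Dict.ofList dict1).items (PySem.Dict.ofList dict2).items).flatMap
          (fun pr => [pr.1, pr.2])).foldl pvStepIns (PySem.Dict.ofList newDict)).items := by
    unfold CombineFunction_alt
    simp only [PySem.List.foldl_append_eq_flatMap, List.nil_append]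
    exact pv_B_eq _ _ (PySem.Dict.nodup_keys_ofList newDict)
  rw [hA, hB]
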